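-- pv_equiv track=rewrite | github.com/matthieuCantat/python | utils/utilsPython.py | sortStringArrayWithRefs
-- ===== SOURCE A (Python) =====
-- def sortStringArrayWithRefs( array , listOrderRef ):
-- 	arraySorted = []
-- 	for orderRef in listOrderRef:
-- 		for i in range(0,len(array)):
-- 			if( orderRef in array[i] ) and not( array[i] in arraySorted ):
-- 				arraySorted.append(array[i])
--
-- 	for i in range(0,len(array)):
-- 		if not( array[i] in arraySorted ):
-- 			arraySorted.append(array[i])
--
-- 	return arraySorted
-- ===== SOURCE B (Python) =====
-- def sortStringArrayWithRefs(array, listOrderRef):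
--     seen = set()
--     dedup = []
--     for s in array:
--         if s not in seen:
--             seen.add(s)
--             dedup.append(s)
--
--     def priority(s):
--         for j, ref in enumerate(listOrderRef):
--             if ref in s:
--                 return j
--         return len(listOrderRef)
--
--     return sorted(dedup, key=priority)
-- ===== Notes on version B (the rewrite author's own statement) =====
-- stated objective: faster
-- what changed: Replaced A's per-reference rescans of the array with list-membership tests against the growing output by a one-pass set-based dedup followed by one stable sort keyed on the index of the first matching reference.
import Mathlib
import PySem

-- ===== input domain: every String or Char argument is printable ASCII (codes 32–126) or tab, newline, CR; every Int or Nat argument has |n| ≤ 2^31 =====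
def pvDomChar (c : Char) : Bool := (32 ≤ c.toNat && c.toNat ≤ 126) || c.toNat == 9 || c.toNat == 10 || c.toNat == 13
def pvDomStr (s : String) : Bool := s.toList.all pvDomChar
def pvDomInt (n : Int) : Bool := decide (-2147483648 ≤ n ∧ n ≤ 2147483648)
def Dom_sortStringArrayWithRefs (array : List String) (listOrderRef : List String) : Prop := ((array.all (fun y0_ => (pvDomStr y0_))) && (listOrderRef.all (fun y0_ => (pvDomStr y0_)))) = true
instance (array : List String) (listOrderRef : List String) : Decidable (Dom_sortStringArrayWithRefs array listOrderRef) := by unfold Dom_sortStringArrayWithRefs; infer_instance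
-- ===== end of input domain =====

-- B replaces A's per-reference rescans of the array (with list-membership tests against the growing
-- output) by a one-pass dedup followed by one stable sort keyed on the index of the first matching
-- reference (measured faster).

-- ===== PORT A =====
def sortStringArrayWithRefs (array : List String) (listOrderRef : List String) : List String :=
  -- 'for i in range(0,len(array)): … array[i] …' iterates the array's values in order
  let arraySorted := listOrderRef.foldl (fun acc orderRef =>
    array.foldl (fun acc2 x =>
      if PySem.Str.isIn orderRef x && !(acc2.contains x) then acc2 ++ [x] else acc2) acc) []
  array.foldl (fun acc x => if !(acc.contains x) then acc ++ [x] else acc) arraySorted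

-- ===== PORT B =====
-- Source B's priority(s): first index j with listOrderRef[j] a substring of s, else len(listOrderRef)
def pvPriority (listOrderRef : List String) (s : String) : Nat :=
  match listOrderRef with
  | [] => 0
  | ref :: rest => if PySem.Str.isIn ref s then 0 else pvPriority rest s + 1

def sortStringArrayWithRefs_alt (array : List String) (listOrderRef : List String) : List String :=
  -- Source B's seen-set/dedup loop: 'seen' always holds exactly the members of 'dedup'
  let dedup := array.foldl (fun acc s => if acc.contains s then acc else acc ++ [s]) []
  PySem.List.sorted dedup (fun s => pvPriority listOrderRef s) false

-- ===== PRECONDITION & SPEC =====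
def Spec_sortStringArrayWithRefs (array : List String) (listOrderRef : List String) (out : List String) : Prop := out = sortStringArrayWithRefs_alt array listOrderRef
instance (array : List String) (listOrderRef : List String) (out : List String) : Decidable (Spec_sortStringArrayWithRefs array listOrderRef out) := by unfold Spec_sortStringArrayWithRefs; infer_instance

-- ===== CLAIM (what is proved, stated in full; the proofs are below) =====
def Claim_equal_sortStringArrayWithRefs : Prop := ∀ (array : List String) (listOrderRef : List String), Dom_sortStringArrayWithRefs array listOrderRef → Spec_sortStringArrayWithRefs array listOrderRef (sortStringArrayWithRefs array listOrderRef)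

-- ===== LEMMAS AND PROOFS =====

-- All the folds in the two ports share one shape: append x iff P x and x not yet present.
def selD (P : String → Bool) (acc : List String) : List String → List String
  | [] => acc
  | x :: xs => selD P (if P x && !acc.contains x then acc ++ [x] else acc) xs

theorem foldl_eq_selD (P : String → Bool) (xs acc : List String) :
    xs.foldl (fun a x => if P x && !a.contains x then a ++ [x] else a) acc = selD P acc xs := by
  induction xs generalizing acc with
  | nil => rfl
  | cons x xs ih => rw [List.foldl_cons]; exact ih _

theorem foldl_dedup_eq_selD (xs acc : List String) :
    xs.foldl (fun a x => if !(a.contains x) then a ++ [x] else a) acc = selD (fun _ => true) acc xs := by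
  induction xs generalizing acc with
  | nil => rfl
  | cons x xs ih => rw [List.foldl_cons]; exact ih _

theorem foldl_bdedup_eq_selD (xs acc : List String) :
    xs.foldl (fun a s => if a.contains s then a else a ++ [s]) acc = selD (fun _ => true) acc xs := by
  induction xs generalizing acc with
  | nil => rfl
  | cons x xs ih =>
    simp only [List.foldl_cons, selD, Bool.true_and]
    rcases h : acc.contains x with _ | _ <;>
      simp only [Bool.not_false, Bool.not_true, if_true] <;> exact ih _

-- characterisation: the fold appends, in first-occurrence order, the P-matching values not in acc
theorem selD_char (xs : List String) (P : String → Bool) (acc : List String) :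
    selD P acc xs
      = acc ++ (selD (fun _ => true) [] xs).filter (fun x => P x && !acc.contains x) := by
  induction xs generalizing P acc with
  | nil => simp [selD]
  | cons x xs ih =>
    have hD : selD (fun _ => true) [] (x :: xs)
        = x :: (selD (fun _ => true) [] xs).filter (fun y => !([x].contains y)) := by
      show selD (fun _ => true) (if _ then _ else _) xs = _
      simp only [List.contains_nil, Bool.not_false, Bool.and_self, if_true, List.nil_append]
      rw [ih (fun _ => true) [x]]
      simp
    rw [hD]
    show selD P (if P x && !acc.contains x then acc ++ [x] else acc) xs = _
    rw [ih P (if P x && !acc.contains x then acc ++ [x] else acc), List.filter_cons,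
      List.filter_filter]
    have hacc : (if P x && !acc.contains x then acc ++ [x] else acc)
        = acc ++ (if P x && !acc.contains x then [x] else []) := by
      cases (P x && !acc.contains x) <;> simp
    rw [hacc]
    have hfilt : (selD (fun _ => true) [] xs).filter
          (fun y => P y && !((acc ++ (if P x && !acc.contains x then [x] else [])).contains y))
        = (selD (fun _ => true) [] xs).filter
          (fun y => (P y && !acc.contains y) && !([x].contains y)) := by
      refine List.filter_congr fun y _ => ?_
      clear ih hD hacc
      rcases hxy : ([x].contains y) with _ | _
      · have e : (if P x && !acc.contains x then [x] else []).contains y = false := by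
          cases (P x && !acc.contains x)
          · simp
          · simpa using hxy
        rw [List.contains_append, e]
        simp
      · have hyx : y = x := by simpa using hxy
        subst hyx
        rw [List.contains_append]
        rcases hc2 : (P y && !acc.contains y) with _ | _ <;> simp_all
    rw [hfilt]
    rcases hc : (P x && !acc.contains x) with _ | _
    · simp
    · simp

-- the buckets: distinct elements with priority exactly k, in first-occurrence order, concatenated
def pvBuckets (listOrderRef : List String) (d : List String) : List String :=
  (List.range (listOrderRef.length + 1)).flatMap
    (fun k => d.filter (fun s => pvPriority listOrderRef s == k))

theorem pvPriority_le (listOrderRef : List String) (s : String) :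
    pvPriority listOrderRef s ≤ listOrderRef.length := by
  induction listOrderRef with
  | nil => simp [pvPriority]
  | cons r rest ih =>
    simp only [pvPriority, List.length_cons]
    split <;> omega

-- ---- A-side: the reference loop fills the buckets 0 .. len-1 in order ----
theorem phase1_char (array : List String) (R : List String) (acc : List String) :
    R.foldl (fun a r => selD (fun x => PySem.Str.isIn r x) a array) acc
      = acc ++ (List.range R.length).flatMap
          (fun j => (selD (fun _ => true) [] array).filter
            (fun s => (pvPriority R s == j) && !acc.contains s)) := by
  induction R generalizing acc with
  | nil => simp
  | cons r R ih =>
    set D := selD (fun _ => true) [] array with hDdef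
    simp only [List.foldl_cons]
    rw [selD_char array _ acc, ih]
    set F := D.filter (fun x => PySem.Str.isIn r x && !acc.contains x) with hF
    have hmemF : ∀ s, s ∈ D → (F.contains s = (PySem.Str.isIn r s && !acc.contains s)) := by
      intro s hs
      simp only [hF, List.contains_eq_mem, List.mem_filter]
      rcases h : (PySem.Str.isIn r s && !decide (s ∈ acc)) with _ | _ <;> simp [hs]
    have hlen : (r :: R).length = R.length + 1 := rfl
    rw [hlen, List.range_succ_eq_map, List.flatMap_cons, List.flatMap_map]
    have h0 : D.filter (fun s => (pvPriority (r :: R) s == 0) && !acc.contains s) = F := by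
      refine List.filter_congr fun s _ => ?_
      simp only [pvPriority]
      rcases PySem.Str.isIn r s <;> simp
    have hsucc : ∀ j, D.filter (fun s => (pvPriority R s == j) && !(acc ++ F).contains s)
        = D.filter (fun s => (pvPriority (r :: R) s == Nat.succ j) && !acc.contains s) := by
      intro j
      refine List.filter_congr fun s hs => ?_
      have hFc := hmemF s hs
      simp only [List.contains_append, hFc, pvPriority]
      rcases PySem.Str.isIn r s <;> rcases acc.contains s <;> simp [Nat.succ_eq_add_one]
    rw [h0]
    simp only [hsucc, List.append_assoc]

-- A computes the bucket concatenation
theorem A_char (array : List String) (listOrderRef : List String) :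
    sortStringArrayWithRefs array listOrderRef
      = pvBuckets listOrderRef (selD (fun _ => true) [] array) := by
  set D := selD (fun _ => true) [] array with hDdef
  set n := listOrderRef.length with hn
  show (array.foldl _ (listOrderRef.foldl _ [])) = _
  have hinner : (fun (acc : List String) (orderRef : String) =>
      array.foldl (fun acc2 x =>
        if PySem.Str.isIn orderRef x && !(acc2.contains x) then acc2 ++ [x] else acc2) acc)
      = fun acc r => selD (fun x => PySem.Str.isIn r x) acc array := by
    funext acc r
    exact foldl_eq_selD _ _ _
  rw [hinner, phase1_char array listOrderRef []]
  simp only [List.contains_nil, Bool.not_false, Bool.and_true, List.nil_append]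
  set P1 := (List.range n).flatMap (fun j => D.filter (fun s => pvPriority listOrderRef s == j))
    with hP1
  rw [foldl_dedup_eq_selD, selD_char array (fun _ => true) P1, ← hDdef]
  have hmemP1 : ∀ s ∈ D, decide (s ∈ P1) = !(pvPriority listOrderRef s == n) := by
    intro s hs
    have hle := pvPriority_le listOrderRef s
    rcases h : pvPriority listOrderRef s == n with _ | _
    · have hlt : pvPriority listOrderRef s < n := by
        have : pvPriority listOrderRef s ≠ n := by simpa using h
        omega
      simp only [Bool.not_false, hP1, List.mem_flatMap, List.mem_range, List.mem_filter,
        decide_eq_true_eq]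
      exact ⟨pvPriority listOrderRef s, hlt, hs, by simp⟩
    · have hn' : pvPriority listOrderRef s = n := by simpa using h
      simp only [Bool.not_true, hP1, List.mem_flatMap, List.mem_range, List.mem_filter,
        decide_eq_false_iff_not, not_exists]
      rintro j ⟨hj, _, hkey⟩
      have : pvPriority listOrderRef s = j := by simpa using hkey
      omega
  have hfilt : D.filter (fun x => true && !P1.contains x)
      = D.filter (fun s => pvPriority listOrderRef s == n) := by
    refine List.filter_congr fun s hs => ?_
    simp [hmemP1 s hs]
  rw [hfilt]
  show P1 ++ _ = pvBuckets listOrderRef D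
  unfold pvBuckets
  rw [← hn, List.range_succ, List.flatMap_append, List.flatMap_cons, List.flatMap_nil,
    List.append_nil]

-- ---- B-side: stable insertion sort by priority also yields the bucket concatenation ----
theorem insertBy_append_not (before : String → String → Bool) (x : String) (p q : List String)
    (h : ∀ y ∈ p, before x y = false) :
    PySem.List.insertBy before x (p ++ q) = p ++ PySem.List.insertBy before x q := by
  induction p with
  | nil => rfl
  | cons a p ih =>
    have ha : before x a = false := h a (by simp)
    have ih' := ih fun y hy => h y (by simp [hy])
    simp [PySem.List.insertBy, ha, ih']

theorem insertBy_all (before : String → String → Bool) (x : String) (q : List String)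
    (h : ∀ y ∈ q, before x y = true) :
    PySem.List.insertBy before x q = x :: q := by
  cases q with
  | nil => rfl
  | cons a q => simp [PySem.List.insertBy, h a (by simp)]

theorem insert_buckets (listOrderRef : List String) (x : String) (d : List String) :
    PySem.List.insertBy
        (fun a b => decide (pvPriority listOrderRef a < pvPriority listOrderRef b)) x
        (pvBuckets listOrderRef d)
      = pvBuckets listOrderRef (d ++ [x]) := by
  set pr := pvPriority listOrderRef with hpr
  set n := listOrderRef.length with hn
  set kx := pr x with hkx
  have hk : kx ≤ n := pvPriority_le _ _
  have hsplit : n + 1 = (kx + 1) + (n - kx) := by omega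
  unfold pvBuckets
  rw [← hpr, ← hn, hsplit, List.range_add, List.flatMap_append, List.flatMap_map,
    List.flatMap_append, List.flatMap_map]
  set Bk := fun k => d.filter (fun s => pr s == k) with hBk
  have hfaps : ∀ k, (d ++ [x]).filter (fun s => pr s == k)
      = Bk k ++ (if pr x == k then [x] else []) := by
    intro k
    rw [List.filter_append]
    congr 1
    rcases h : pr x == k with _ | _ <;> simp [h]
  simp only [hfaps]
  -- left chunk of the target: buckets 0..kx, with x appended at the end of bucket kx
  have hL : (List.range (kx + 1)).flatMap (fun k => Bk k ++ (if pr x == k then [x] else []))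
      = (List.range (kx + 1)).flatMap Bk ++ [x] := by
    rw [List.range_succ, List.flatMap_append, List.flatMap_append,
      List.flatMap_cons, List.flatMap_nil, List.flatMap_cons, List.flatMap_nil]
    have hmid : ∀ k ∈ List.range kx, Bk k ++ (if pr x == k then [x] else []) = Bk k := by
      intro k hkmem
      have : k < kx := by simpa using hkmem
      have : (pr x == k) = false := by simp [← hkx]; omega
      simp [this]
    rw [List.flatMap_congr hmid]
    have : (pr x == kx) = true := by simp [hkx]
    simp [this]
  -- right chunk: buckets kx+1..n are untouched
  have hR : (List.range (n - kx)).flatMap (fun i => Bk (kx + 1 + i) ++ (if pr x == kx + 1 + i then [x] else []))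
      = (List.range (n - kx)).flatMap (fun i => Bk (kx + 1 + i)) := by
    refine List.flatMap_congr fun i _ => ?_
    have : (pr x == kx + 1 + i) = false := by simp [← hkx]; omega
    simp [this]
  rw [hL, hR]
  -- now insert x into P ++ Q
  have hP : ∀ y ∈ (List.range (kx + 1)).flatMap Bk, decide (pr x < pr y) = false := by
    intro y hy
    simp only [List.mem_flatMap, List.mem_range, hBk, List.mem_filter] at hy
    obtain ⟨k, hklt, _, hkey⟩ := hy
    have : pr y = k := by simpa using hkey
    simp [← hkx]; omega
  have hQ : ∀ y ∈ (List.range (n - kx)).flatMap (fun i => Bk (kx + 1 + i)),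
      decide (pr x < pr y) = true := by
    intro y hy
    simp only [List.mem_flatMap, List.mem_range, hBk, List.mem_filter] at hy
    obtain ⟨i, _, _, hkey⟩ := hy
    have : pr y = kx + 1 + i := by simpa using hkey
    simp [← hkx]; omega
  rw [insertBy_append_not _ _ _ _ hP, insertBy_all _ _ _ hQ]
  simp [List.append_assoc, hBk]

theorem B_char (listOrderRef : List String) (d : List String) :
    PySem.List.sorted d (fun s => pvPriority listOrderRef s) false
      = pvBuckets listOrderRef d := by
  induction d using List.reverseRecOn with
  | nil =>
    rw [PySem.List.sorted_eq_foldl_insertBy]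
    simp [pvBuckets]
  | append_singleton d x ih =>
    rw [PySem.List.sorted_eq_foldl_insertBy, List.foldl_append, List.foldl_cons, List.foldl_nil,
      ← PySem.List.sorted_eq_foldl_insertBy, ih]
    exact insert_buckets listOrderRef x d

-- ===== VERDICT (by name: the statement is the Claim_ definition above) =====
theorem sortStringArrayWithRefs_spec : Claim_equal_sortStringArrayWithRefs := by
  intro array listOrderRef _
  show sortStringArrayWithRefs array listOrderRef = sortStringArrayWithRefs_alt array listOrderRef
  rw [A_char]
  show _ = PySem.List.sorted (array.foldl _ []) _ false
  rw [foldl_bdedup_eq_selD, B_char]
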